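-- pv_equiv track=rewrite | github.com/nzrsky/robotstxt | singleheader/amalgamate.py | strip_include_guards
-- ===== SOURCE A (Python) =====
-- def strip_include_guards(content):
--     """Remove include guards from header content."""
--     lines = content.split('\n')
--     result = []
--     skip_first_ifndef = True
--     skip_first_define = True
--
--     i = 0
--     while i < len(lines):
--         line = lines[i]
--         stripped = line.strip()
--
--         # Skip the opening #ifndef GUARD
--         if skip_first_ifndef and stripped.startswith('#ifndef ') and '_H' in stripped:
--             skip_first_ifndef = False
--             i += 1
--             continue
--
--         # Skip the opening #define GUARD
--         if skip_first_define and stripped.startswith('#define ') and '_H' in stripped: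
--             skip_first_define = False
--             i += 1
--             continue
--
--         result.append(line)
--         i += 1
--
--     # Remove trailing #endif for the guard
--     while result and result[-1].strip() == '':
--         result.pop()
--
--     if result and result[-1].strip().startswith('#endif'):
--         result.pop()
--
--     return '\n'.join(result)
-- ===== SOURCE B (Python) =====
-- def strip_include_guards(content):
--     """Remove include guards from header content."""
--     lines = content.split('\n')
--
--     def first_idx(directive):
--         return next((i for i, line in enumerate(lines)
--                      if line.strip().startswith(directive) and '_H' in line.strip()),
--                     None)
--
--     skip = {first_idx('#ifndef '), first_idx('#define ')}
--     rev = [line for i, line in enumerate(lines) if i not in skip][::-1]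
--     while rev and rev[0].strip() == '':
--         rev = rev[1:]
--     if rev and rev[0].strip().startswith('#endif'):
--         rev = rev[1:]
--     return '\n'.join(rev[::-1])
-- ===== Notes on version B (the rewrite author's own statement) =====
-- stated objective: alternative
-- what changed: Replaces A's stateful while-loop with two skip flags by locating the first '#ifndef …_H' and first '#define …_H' line indices, filtering those indices out of the enumerated lines in one comprehension, and doing the trailing blank/#endif trim by dropping from the front of the reversed list.
import Mathlib
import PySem

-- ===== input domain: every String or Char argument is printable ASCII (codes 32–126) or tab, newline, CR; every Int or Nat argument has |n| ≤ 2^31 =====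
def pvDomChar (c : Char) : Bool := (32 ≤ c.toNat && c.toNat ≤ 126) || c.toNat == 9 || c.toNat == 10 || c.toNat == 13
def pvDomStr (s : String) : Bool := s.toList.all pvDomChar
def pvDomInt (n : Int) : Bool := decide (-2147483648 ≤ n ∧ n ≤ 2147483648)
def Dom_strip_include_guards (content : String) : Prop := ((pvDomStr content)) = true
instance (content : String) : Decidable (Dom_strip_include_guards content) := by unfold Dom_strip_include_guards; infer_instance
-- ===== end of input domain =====

-- B replaces A's stateful two-flag single pass with locate-the-two-guard-indices then one
-- enumerate-filter, and trims trailing blank/#endif lines on the reversed list (objective: alternative).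

-- ===== PORT A =====
-- the while loop with flags skip_first_ifndef / skip_first_define, building `result`
def pvA_loop : List String → Bool → Bool → List String
  | [], _, _ => []
  | l :: ls, f1, f2 =>
    let stripped := PySem.Str.strip l
    if f1 && PySem.Str.startswith stripped "#ifndef " && PySem.Str.isIn "_H" stripped then
      pvA_loop ls false f2
    else if f2 && PySem.Str.startswith stripped "#define " && PySem.Str.isIn "_H" stripped then
      pvA_loop ls f1 false
    else
      l :: pvA_loop ls f1 f2

-- `while result and result[-1].strip() == '': result.pop()`
def pvA_trimBlanks (r : List String) : List String :=
  match h : r.getLast? with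
  | some l => if PySem.Str.strip l == "" then pvA_trimBlanks r.dropLast else r
  | none => r
termination_by r.length
decreasing_by
  have : r ≠ [] := by intro hr; subst hr; simp at h
  cases r with
  | nil => exact absurd rfl this
  | cons a as => simp [List.length_dropLast]

-- `if result and result[-1].strip().startswith('#endif'): result.pop()`
def pvA_trimEndif (r : List String) : List String :=
  match r.getLast? with
  | some l => if PySem.Str.startswith (PySem.Str.strip l) "#endif" then r.dropLast else r
  | none => r

def strip_include_guards (content : String) : String :=
  PySem.Str.join "\n"
    (pvA_trimEndif (pvA_trimBlanks (pvA_loop ((PySem.Str.split? content "\n").getD []) true true)))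

-- ===== PORT B =====
-- the guard-line predicate on the stripped line
def pvB_pred (d l : String) : Bool :=
  PySem.Str.startswith (PySem.Str.strip l) d && PySem.Str.isIn "_H" (PySem.Str.strip l)

-- `next((i for i, line in enumerate(lines) if …), None)`
def pvB_firstIdx (d : String) : List String → Int → Option Int
  | [], _ => none
  | l :: ls, i => if pvB_pred d l then some i else pvB_firstIdx d ls (i + 1)

-- `while rev and rev[0].strip() == '': rev = rev[1:]`
def pvB_dropBlanks : List String → List String
  | [] => []
  | l :: ls => if PySem.Str.strip l == "" then pvB_dropBlanks ls else l :: ls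

-- `if rev and rev[0].strip().startswith('#endif'): rev = rev[1:]`
def pvB_dropEndif : List String → List String
  | [] => []
  | l :: ls => if PySem.Str.startswith (PySem.Str.strip l) "#endif" then ls else l :: ls

def strip_include_guards_alt (content : String) : String :=
  let lines := (PySem.Str.split? content "\n").getD []
  let o1 := pvB_firstIdx "#ifndef " lines 0
  let o2 := pvB_firstIdx "#define " lines 0
  let rev := (((PySem.List.enumerate lines 0).filter
      (fun p => !(some p.1 == o1 || some p.1 == o2))).map (·.2)).reverse
  PySem.Str.join "\n" (pvB_dropEndif (pvB_dropBlanks rev)).reverse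

-- ===== PRECONDITION & SPEC =====
def Spec_strip_include_guards (content : String) (out : String) : Prop := out = strip_include_guards_alt content
instance (content : String) (out : String) : Decidable (Spec_strip_include_guards content out) := by unfold Spec_strip_include_guards; infer_instance

-- ===== CLAIM (what is proved, stated in full; the proofs are below) =====
def Claim_equal_strip_include_guards : Prop := ∀ (content : String), Dom_strip_include_guards content → Spec_strip_include_guards content (strip_include_guards content)

-- ===== LEMMAS AND PROOFS =====

-- B's filter pass, with the enumeration start as parameter
def pvFilt (ls : List String) (s : Int) (o1 o2 : Option Int) : List String :=
  ((PySem.List.enumerate ls s).filter (fun p => !(some p.1 == o1 || some p.1 == o2))).map (·.2)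

def pvOptIdx (f : Bool) (d : String) (ls : List String) (s : Int) : Option Int :=
  if f then pvB_firstIdx d ls s else none

lemma pvFilt_nil (s : Int) (o1 o2 : Option Int) : pvFilt [] s o1 o2 = [] := by
  simp [pvFilt, PySem.List.enumerate_nil]

lemma pvFilt_cons (l : String) (ls : List String) (s : Int) (o1 o2 : Option Int) :
    pvFilt (l :: ls) s o1 o2 =
      (if some s == o1 || some s == o2 then [] else [l]) ++ pvFilt ls (s + 1) o1 o2 := by
  simp only [pvFilt, PySem.List.enumerate_cons, List.filter_cons]
  by_cases h : (some s == o1 || some s == o2) = true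
  · simp [h]
  · simp at h
    simp [h]

lemma pvB_firstIdx_ge (d : String) (ls : List String) (s j : Int)
    (h : pvB_firstIdx d ls s = some j) : s ≤ j := by
  induction ls generalizing s with
  | nil => simp [pvB_firstIdx] at h
  | cons l ls ih =>
    simp only [pvB_firstIdx] at h
    by_cases hp : pvB_pred d l
    · simp [hp] at h; omega
    · simp [hp] at h; have := ih (s + 1) h; omega

lemma pvOptIdx_ge (f : Bool) (d : String) (ls : List String) (s j : Int)
    (h : pvOptIdx f d ls s = some j) : s ≤ j := by
  unfold pvOptIdx at h
  by_cases hf : f = true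
  · exact pvB_firstIdx_ge d ls s j (by simpa [hf] using h)
  · simp [hf] at h

-- an index below the enumeration start never matches: it may be replaced by none
lemma pvFilt_drop_lt_left (ls : List String) (s j : Int) (hj : j < s) (o2 : Option Int) :
    pvFilt ls s (some j) o2 = pvFilt ls s none o2 := by
  unfold pvFilt
  congr 1
  apply List.filter_congr
  intro p hp
  rcases (PySem.List.mem_enumerate_iff _ _ _).1 hp with ⟨k, hk, rfl⟩
  simp only [Bool.not_or]
  congr 1
  have : ¬ (s + (k : Int) = j) := by omega
  simp [this]

lemma pvFilt_drop_lt_right (ls : List String) (s j : Int) (hj : j < s) (o1 : Option Int) :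
    pvFilt ls s o1 (some j) = pvFilt ls s o1 none := by
  unfold pvFilt
  congr 1
  apply List.filter_congr
  intro p hp
  rcases (PySem.List.mem_enumerate_iff _ _ _).1 hp with ⟨k, hk, rfl⟩
  simp only [Bool.not_or]
  congr 1
  have : ¬ (s + (k : Int) = j) := by omega
  simp [this]

-- a stripped line cannot start with both "#ifndef " and "#define "
lemma pvPred_disjoint (l : String) (h1 : pvB_pred "#ifndef " l = true) :
    pvB_pred "#define " l = false := by
  by_contra h2
  simp only [Bool.not_eq_false] at h2
  unfold pvB_pred at h1 h2
  have p1 : PySem.Str.startswith (PySem.Str.strip l) "#ifndef " = true := Bool.and_elim_left h1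
  have p2 : PySem.Str.startswith (PySem.Str.strip l) "#define " = true := Bool.and_elim_left h2
  rw [PySem.Str.startswith_eq] at p1 p2
  have h1' := (PySem.Chars.startswith_iff _ _).1 p1
  have h2' := (PySem.Chars.startswith_iff _ _).1 p2
  have hpre : ("#ifndef ".toList) <+: ("#define ".toList) :=
    List.prefix_of_prefix_length_le h1' h2' (by decide)
  have := hpre.eq_of_length (by decide)
  exact absurd this (by decide)

-- the key invariant: the two-flag loop equals the locate-then-filter pass
lemma pvLoop_eq_filt (ls : List String) (f1 f2 : Bool) (s : Int) :
    pvA_loop ls f1 f2 =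
      pvFilt ls s (pvOptIdx f1 "#ifndef " ls s) (pvOptIdx f2 "#define " ls s) := by
  induction ls generalizing f1 f2 s with
  | nil => simp [pvA_loop, pvFilt_nil]
  | cons l ls ih =>
    have hpred1 : (PySem.Str.startswith (PySem.Str.strip l) "#ifndef " &&
        PySem.Str.isIn "_H" (PySem.Str.strip l)) = pvB_pred "#ifndef " l := rfl
    have hpred2 : (PySem.Str.startswith (PySem.Str.strip l) "#define " &&
        PySem.Str.isIn "_H" (PySem.Str.strip l)) = pvB_pred "#define " l := rfl
    simp only [pvA_loop, Bool.and_assoc, hpred1, hpred2]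
    by_cases hb1 : (f1 && pvB_pred "#ifndef " l) = true
    · obtain ⟨hf1, hp1⟩ := Bool.and_eq_true_iff.1 hb1
      have hp2 : pvB_pred "#define " l = false := pvPred_disjoint l hp1
      have ho1 : pvOptIdx f1 "#ifndef " (l :: ls) s = some s := by
        simp [pvOptIdx, hf1, pvB_firstIdx, hp1]
      have ho2 : pvOptIdx f2 "#define " (l :: ls) s = pvOptIdx f2 "#define " ls (s + 1) := by
        by_cases hf2 : f2 = true <;> simp [pvOptIdx, hf2, pvB_firstIdx, hp2]
      rw [hb1, if_pos rfl, ho1, ho2, pvFilt_cons]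
      have hhead : (some s == some s ||
          some s == pvOptIdx f2 "#define " ls (s + 1)) = true := by simp
      rw [hhead, if_pos rfl, List.nil_append,
        pvFilt_drop_lt_left ls (s + 1) s (by omega)]
      have : (none : Option Int) = pvOptIdx false "#ifndef " ls (s + 1) := by simp [pvOptIdx]
      rw [this, ih false f2 (s + 1)]
    · rw [Bool.not_eq_true] at hb1
      have ho1 : pvOptIdx f1 "#ifndef " (l :: ls) s = pvOptIdx f1 "#ifndef " ls (s + 1) := by
        by_cases hf1 : f1 = true
        · have hp1 : pvB_pred "#ifndef " l = false := by
            rcases Bool.and_eq_false_iff.1 hb1 with h | h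
            · rw [hf1] at h; exact absurd h (by simp)
            · exact h
          simp [pvOptIdx, hf1, pvB_firstIdx, hp1]
        · simp [pvOptIdx, hf1]
      by_cases hb2 : (f2 && pvB_pred "#define " l) = true
      · obtain ⟨hf2, hp2⟩ := Bool.and_eq_true_iff.1 hb2
        have ho2 : pvOptIdx f2 "#define " (l :: ls) s = some s := by
          simp [pvOptIdx, hf2, pvB_firstIdx, hp2]
        rw [hb1, if_neg (by simp), hb2, if_pos rfl, ho1, ho2, pvFilt_cons]
        have hhead : (some s == pvOptIdx f1 "#ifndef " ls (s + 1) ||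
            some s == some s) = true := by simp
        rw [hhead, if_pos rfl, List.nil_append,
          pvFilt_drop_lt_right ls (s + 1) s (by omega)]
        have : (none : Option Int) = pvOptIdx false "#define " ls (s + 1) := by simp [pvOptIdx]
        rw [this, ih f1 false (s + 1)]
      · rw [Bool.not_eq_true] at hb2
        have ho2 : pvOptIdx f2 "#define " (l :: ls) s = pvOptIdx f2 "#define " ls (s + 1) := by
          by_cases hf2 : f2 = true
          · have hp2 : pvB_pred "#define " l = false := by
              rcases Bool.and_eq_false_iff.1 hb2 with h | h
              · rw [hf2] at h; exact absurd h (by simp)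
              · exact h
            simp [pvOptIdx, hf2, pvB_firstIdx, hp2]
          · simp [pvOptIdx, hf2]
        rw [hb1, if_neg (by simp), hb2, if_neg (by simp), ho1, ho2, pvFilt_cons]
        have hne1 : (some s == pvOptIdx f1 "#ifndef " ls (s + 1)) = false := by
          cases h : pvOptIdx f1 "#ifndef " ls (s + 1) with
          | none => simp
          | some j => have := pvOptIdx_ge f1 _ ls (s + 1) j h; simp; omega
        have hne2 : (some s == pvOptIdx f2 "#define " ls (s + 1)) = false := by
          cases h : pvOptIdx f2 "#define " ls (s + 1) with
          | none => simp
          | some j => have := pvOptIdx_ge f2 _ ls (s + 1) j h; simp; omega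
        rw [hne1, hne2]
        simp only [Bool.or_self, if_neg (by simp : ¬ false = true), List.singleton_append]
        rw [ih f1 f2 (s + 1)]

-- trailing trims equal front drops on the reversed list
lemma pvTrimBlanks_reverse (rev : List String) :
    pvA_trimBlanks rev.reverse = (pvB_dropBlanks rev).reverse := by
  induction rev with
  | nil => simp [pvA_trimBlanks, pvB_dropBlanks]
  | cons x xs ih =>
    rw [pvA_trimBlanks]
    split
    · rename_i l h
      rw [List.reverse_cons, List.getLast?_concat] at h
      obtain rfl : x = l := by injection h
      rw [pvB_dropBlanks]
      by_cases hx : (PySem.Str.strip x == "") = true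
      · rw [if_pos hx, if_pos hx, List.reverse_cons, List.dropLast_concat, ih]
      · rw [Bool.not_eq_true] at hx
        rw [if_neg (by simpa using hx), if_neg (by simpa using hx), List.reverse_cons]
    · rename_i h
      rw [List.reverse_cons, List.getLast?_concat] at h
      exact absurd h (by simp)

lemma pvTrimEndif_reverse (rev : List String) :
    pvA_trimEndif rev.reverse = (pvB_dropEndif rev).reverse := by
  cases rev with
  | nil => simp [pvA_trimEndif, pvB_dropEndif]
  | cons x xs =>
    rw [List.reverse_cons, pvB_dropEndif]
    simp only [pvA_trimEndif, List.getLast?_concat, List.dropLast_concat]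
    split_ifs with h
    · rfl
    · rw [List.reverse_cons]

-- ===== VERDICT (by name: the statement is the Claim_ definition above) =====
theorem strip_include_guards_spec : Claim_equal_strip_include_guards := by
  intro content _
  unfold Spec_strip_include_guards
  simp only [strip_include_guards, strip_include_guards_alt]
  set lines := (PySem.Str.split? content "\n").getD [] with hl
  have hloop : pvA_loop lines true true =
      pvFilt lines 0 (pvB_firstIdx "#ifndef " lines 0) (pvB_firstIdx "#define " lines 0) := by
    have := pvLoop_eq_filt lines true true 0
    simpa [pvOptIdx] using this
  rw [hloop]
  congr 1
  set mid := pvFilt lines 0 (pvB_firstIdx "#ifndef " lines 0) (pvB_firstIdx "#define " lines 0)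
    with hmid
  have hrev : mid = mid.reverse.reverse := by simp
  rw [hrev, pvTrimBlanks_reverse, pvTrimEndif_reverse]
  rfl
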